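-- pv_equiv track=rewrite | github.com/vuhung16au/math-olympiad-ml | rubiks_group_theory/core/move_metrics.py | canonicalize_moves
-- ===== SOURCE A (Python) =====
-- from typing import Dict, List, Optional, Tuple
--
-- def parse_move_amount(move: str) -> Tuple[str, int]:
--     """Convert move token to (face, quarter-turn amount mod 4)."""
--     if move.endswith("2"):
--         return move[0], 2
--     if move.endswith("'"):
--         return move[0], 3
--     return move[0], 1
--
-- def canonicalize_moves(moves: List[str]) -> List[str]:
--     """Reduce adjacent same-face moves for HTM/QTM counting."""
--     reduced: List[Tuple[str, int]] = []
--     for move in moves: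
--         face, amt = parse_move_amount(move)
--         if reduced and reduced[-1][0] == face:
--             prev_face, prev_amt = reduced[-1]
--             new_amt = (prev_amt + amt) % 4
--             if new_amt == 0:
--                 reduced.pop()
--             else:
--                 reduced[-1] = (prev_face, new_amt)
--         else:
--             reduced.append((face, amt % 4))
--
--     out = []
--     for face, amt in reduced:
--         if amt == 1:
--             out.append(face)
--         elif amt == 2:
--             out.append(f"{face}2")
--         elif amt == 3:
--             out.append(f"{face}'")
--     return out
-- ===== SOURCE B (Python) =====
-- def canonicalize_moves(moves):
--     """Parse all tokens, then repeatedly rescan for the first mergeable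
--     adjacent same-face pair until no merge applies (fixpoint), then format."""
--     ps = [(m[0], 2 if m[-1] == "2" else 3 if m[-1] == "'" else 1) for m in moves]
--     while True:
--         for i in range(len(ps) - 1):
--             if ps[i][0] == ps[i + 1][0]:
--                 s = (ps[i][1] + ps[i + 1][1]) % 4
--                 ps[i:i + 2] = [] if s == 0 else [(ps[i][0], s)]
--                 break
--         else:
--             break
--     return [f if a == 1 else f + "2" if a == 2 else f + "'" for f, a in ps]
-- ===== Notes on version B (the rewrite author's own statement) =====
-- stated objective: alternative
-- what changed: A does one left-to-right pass with a mutable stack merging each move into the stack top; B first parses every token to (face, amount), then runs a fixpoint reduction that repeatedly rescans the whole list for the first adjacent same-face pair, splices in the combined amount mod 4 (or removes both), and restarts until no pair merges, then formats; confluence makes both reach the same normal form.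
import Mathlib
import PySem

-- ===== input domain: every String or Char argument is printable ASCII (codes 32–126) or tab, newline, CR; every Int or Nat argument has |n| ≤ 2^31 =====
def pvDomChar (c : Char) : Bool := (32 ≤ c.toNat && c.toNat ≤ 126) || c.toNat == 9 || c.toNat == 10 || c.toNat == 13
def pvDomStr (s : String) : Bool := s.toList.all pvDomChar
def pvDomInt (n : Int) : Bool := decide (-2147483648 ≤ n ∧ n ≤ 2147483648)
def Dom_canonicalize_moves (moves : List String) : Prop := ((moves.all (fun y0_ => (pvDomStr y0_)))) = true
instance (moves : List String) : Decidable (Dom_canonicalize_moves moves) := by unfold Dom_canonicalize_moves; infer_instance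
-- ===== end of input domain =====

-- B replaces A's single stack pass by parse-then-fixpoint rescanning for the first mergeable adjacent pair (objective: alternative; B is not faster).

-- ===== PORT A =====
-- parse_move_amount: face = move[0] (pyGet? none = IndexError on "", excluded by Pre_; "" stands in there)
def parse_move_amount (move : String) : String × Int :=
  let face : String := match PySem.Str.pyGet? move 0 with | some c => String.ofList [c] | none => ""
  if PySem.Str.endswith move "2" then (face, 2)
  else if PySem.Str.endswith move "'" then (face, 3)
  else (face, 1)

-- one iteration of A's loop body (reduced[-1] inspection, pop / replace-last / append)
def stepA (red : List (String × Int)) (p : String × Int) : List (String × Int) :=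
  match red.getLast? with
  | some q =>
      if q.1 = p.1 then
        if PySem.Int.mod (q.2 + p.2) 4 = 0 then red.dropLast
        else red.dropLast ++ [(q.1, PySem.Int.mod (q.2 + p.2) 4)]
      else red ++ [(p.1, PySem.Int.mod p.2 4)]
  | none => red ++ [(p.1, PySem.Int.mod p.2 4)]

-- one iteration of A's output loop
def fmtA (out : List String) (p : String × Int) : List String :=
  if p.2 = 1 then out ++ [p.1]
  else if p.2 = 2 then out ++ [p.1 ++ "2"]
  else if p.2 = 3 then out ++ [p.1 ++ "'"]
  else out

def canonicalize_moves (moves : List String) : List String :=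
  (moves.foldl (fun red m => stepA red (parse_move_amount m)) []).foldl fmtA []

-- ===== PORT B =====
-- B's parse of one token: amount from move[-1], face from move[0] (pyGet? none = IndexError on "", excluded by Pre_)
def parseB (move : String) : String × Int :=
  (match PySem.Str.pyGet? move 0 with | some c => String.ofList [c] | none => "",
   if PySem.Str.pyGet? move (-1) = some '2' then 2
   else if PySem.Str.pyGet? move (-1) = some '\'' then 3
   else 1)

-- B's inner scan: find the FIRST adjacent same-face pair and splice in the merge; none = no pair found
def scanMerge : List (String × Int) → Option (List (String × Int))
  | [] => none
  | [_] => none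
  | p :: q :: rest =>
      if p.1 = q.1 then
        some (if PySem.Int.mod (p.2 + q.2) 4 = 0 then rest
              else (p.1, PySem.Int.mod (p.2 + q.2) 4) :: rest)
      else (scanMerge (q :: rest)).map (p :: ·)

-- each successful merge shortens the list (cited by reduceFix's termination)
theorem scanMerge_length : ∀ {l l' : List (String × Int)}, scanMerge l = some l' → l'.length < l.length := by
  intro l
  induction l with
  | nil => intro l' h; simp [scanMerge] at h
  | cons p t ih =>
    intro l' h
    match t with
    | [] => simp [scanMerge] at h
    | q :: rest =>
      simp only [scanMerge] at h
      split_ifs at h with hf hz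
      · rw [Option.some_inj] at h; subst h; simp
      · rw [Option.some_inj] at h; subst h; simp
      · cases hm : scanMerge (q :: rest) with
        | none => rw [hm] at h; simp at h
        | some m =>
          rw [hm] at h
          simp only [Option.map_some, Option.some_inj] at h
          subst h
          have := ih hm
          simp at this ⊢
          omega

-- B's outer while-loop: rescan until no adjacent pair merges
def reduceFix (l : List (String × Int)) : List (String × Int) :=
  match h : scanMerge l with
  | some l' => reduceFix l'
  | none => l
termination_by l.length
decreasing_by exact scanMerge_length h

def canonicalize_moves_alt (moves : List String) : List String :=
  (reduceFix (moves.map parseB)).map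
    (fun p => if p.2 = 1 then p.1 else if p.2 = 2 then p.1 ++ "2" else p.1 ++ "'")

-- ===== PRECONDITION & SPEC =====
-- Pre_ excludes lists containing the empty-string token, on which A raises IndexError at move[0] (B raises too).
def Pre_canonicalize_moves (moves : List String) : Prop := ∀ m ∈ moves, m ≠ ""
instance (moves : List String) : Decidable (Pre_canonicalize_moves moves) := by
  unfold Pre_canonicalize_moves; infer_instance

def pvWitness_canonicalize_moves : List String := ["R", "U2", "U2", "R'"]

def Spec_canonicalize_moves (moves : List String) (out : List String) : Prop := out = canonicalize_moves_alt moves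
instance (moves : List String) (out : List String) : Decidable (Spec_canonicalize_moves moves out) := by
  unfold Spec_canonicalize_moves; infer_instance

-- ===== CLAIM (what is proved, stated in full; the proofs are below) =====
def Claim_equal_canonicalize_moves : Prop := ∀ (moves : List String), Dom_canonicalize_moves moves → Pre_canonicalize_moves moves → Spec_canonicalize_moves moves (canonicalize_moves moves)

-- ===== LEMMAS AND PROOFS =====

-- proof-only smart-cons: merging one element into the head of an already-canonical suffix;
-- both A's stack fold and B's fixpoint are shown equal to foldr pushB [].
def pushB (p : String × Int) (acc : List (String × Int)) : List (String × Int) :=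
  match acc with
  | q :: rest =>
      if q.1 = p.1 then
        if PySem.Int.mod (p.2 + q.2) 4 = 0 then rest
        else (p.1, PySem.Int.mod (p.2 + q.2) 4) :: rest
      else p :: q :: rest
  | [] => [p]

def RedOK (l : List (String × Int)) : Prop :=
  l.IsChain (fun p q => p.1 ≠ q.1) ∧ ∀ p ∈ l, p.2 = 1 ∨ p.2 = 2 ∨ p.2 = 3

def AmtOK (l : List (String × Int)) : Prop := ∀ p ∈ l, p.2 = 1 ∨ p.2 = 2 ∨ p.2 = 3

theorem mod4_emod (a : Int) : PySem.Int.mod a 4 = a % 4 :=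
  PySem.Int.mod_eq_emod_of_pos (by omega)

theorem mod4_small {a : Int} (h : a = 1 ∨ a = 2 ∨ a = 3) : PySem.Int.mod a 4 = a := by
  rw [mod4_emod]; omega

theorem pushB_red {p : String × Int} {v : List (String × Int)}
    (hv : RedOK v) (hp : p.2 = 1 ∨ p.2 = 2 ∨ p.2 = 3) : RedOK (pushB p v) := by
  obtain ⟨hc, ha⟩ := hv
  match v with
  | [] =>
    refine ⟨List.IsChain.singleton p, ?_⟩
    intro x hx
    simp only [pushB, List.mem_singleton] at hx
    exact hx ▸ hp
  | q :: rest =>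
    simp only [pushB]
    split_ifs with hf hz
    · exact ⟨hc.of_cons, fun x hx => ha x (List.mem_cons_of_mem q hx)⟩
    · constructor
      · rw [List.isChain_cons] at hc ⊢
        exact ⟨fun b hb => hf ▸ hc.1 b hb, hc.2⟩
      · intro x hx
        rcases List.mem_cons.mp hx with rfl | hx
        · have hq := ha q (by simp)
          rw [mod4_emod] at hz ⊢
          simp only []
          rcases hp with h1|h1 <;> rcases hq with h2|h2 <;> omega
        · exact ha x (List.mem_cons_of_mem q hx)
    · constructor
      · rw [List.isChain_cons]
        exact ⟨fun b hb => by simp at hb; exact fun he => hf (hb ▸ he.symm ▸ rfl), hc⟩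
      · intro x hx
        rcases List.mem_cons.mp hx with rfl | hx
        · exact hp
        · exact ha x hx

theorem redok_concat_left {t : List (String × Int)} {q : String × Int}
    (h : RedOK (t ++ [q])) : RedOK t := by
  obtain ⟨hc, ha⟩ := h
  rw [List.isChain_append] at hc
  exact ⟨hc.1, fun x hx => ha x (List.mem_append_left _ hx)⟩

theorem redok_concat {t : List (String × Int)} {q p : String × Int}
    (h : RedOK (t ++ [q])) (hf : q.1 ≠ p.1) (hp : p.2 = 1 ∨ p.2 = 2 ∨ p.2 = 3) :
    RedOK (t ++ [q] ++ [p]) := by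
  obtain ⟨hc, ha⟩ := h
  constructor
  · rw [List.isChain_append]
    refine ⟨hc, List.IsChain.singleton p, ?_⟩
    intro x hx y hy
    simp only [List.getLast?_concat, Option.mem_some_iff] at hx
    simp only [List.head?_cons, Option.mem_some_iff] at hy
    exact hx ▸ hy ▸ hf
  · intro x hx
    rcases List.mem_append.mp hx with hx | hx
    · exact ha x hx
    · simp only [List.mem_singleton] at hx; exact hx ▸ hp

theorem redok_swap_last {t : List (String × Int)} {q : String × Int} {b : Int}
    (h : RedOK (t ++ [q])) (hb : b = 1 ∨ b = 2 ∨ b = 3) : RedOK (t ++ [(q.1, b)]) := by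
  obtain ⟨hc, ha⟩ := h
  rw [List.isChain_append] at hc
  constructor
  · rw [List.isChain_append]
    refine ⟨hc.1, List.IsChain.singleton _, ?_⟩
    intro x hx y hy
    simp only [List.head?_cons, Option.mem_some_iff] at hy
    subst hy
    exact hc.2.2 x hx q (by simp)
  · intro x hx
    rcases List.mem_append.mp hx with hx | hx
    · exact ha x (List.mem_append_left _ hx)
    · simp only [List.mem_singleton] at hx; exact hx ▸ hb

theorem stepA_red {p : String × Int} {s : List (String × Int)}
    (hs : RedOK s) (hp : p.2 = 1 ∨ p.2 = 2 ∨ p.2 = 3) : RedOK (stepA s p) := by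
  rcases s.eq_nil_or_concat' with rfl | ⟨t, q, rfl⟩
  · simp only [stepA, List.getLast?_nil, List.nil_append, mod4_small hp]
    exact ⟨List.IsChain.singleton p, fun x hx => by
      simp only [List.mem_singleton] at hx; exact hx ▸ hp⟩
  · simp only [stepA, List.getLast?_concat, List.dropLast_concat]
    split_ifs with hf hz
    · exact redok_concat_left hs
    · refine redok_swap_last hs ?_
      have hq := hs.2 q (by simp)
      rw [mod4_emod] at hz ⊢
      rcases hp with h1|h1 <;> rcases hq with h2|h2 <;> omega
    · rw [mod4_small hp]
      exact redok_concat hs hf hp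

theorem foldr_pushB_fix {u : List (String × Int)}
    (hu : u.IsChain (fun p q => (p : String × Int).1 ≠ q.1)) :
    u.foldr pushB [] = u := by
  induction u with
  | nil => rfl
  | cons p u' ih =>
    rw [List.foldr_cons, ih hu.of_cons]
    cases u' with
    | nil => rfl
    | cons q w =>
      have hne : p.1 ≠ q.1 := by
        rw [List.isChain_cons] at hu
        exact hu.1 q (by simp)
      simp only [pushB, if_neg (Ne.symm hne)]

theorem pushB_nil (p : String × Int) : pushB p [] = [p] := rfl

theorem pushB_same (f : String) (x b : Int) (w : List (String × Int)) :
    pushB (f, x) ((f, b) :: w) = if (x + b) % 4 = 0 then w else (f, (x + b) % 4) :: w := by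
  simp [pushB]

theorem pushB_diff {f2 f : String} (hne : f2 ≠ f) (x b : Int) (w : List (String × Int)) :
    pushB (f, x) ((f2, b) :: w) = (f, x) :: (f2, b) :: w := by
  simp [pushB, hne]

theorem push_cancel {f : String} {a a' : Int} {v : List (String × Int)}
    (hv : RedOK v) (ha' : a' = 1 ∨ a' = 2 ∨ a' = 3)
    (hz : PySem.Int.mod (a' + a) 4 = 0) :
    pushB (f, a') (pushB (f, a) v) = v := by
  obtain ⟨hc, hm⟩ := hv
  rw [mod4_emod] at hz
  match v with
  | [] =>
    rw [pushB_nil, pushB_same, if_pos (by omega)]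
  | (f2, b) :: w =>
    by_cases hf : f2 = f
    · subst hf
      have hb : b = 1 ∨ b = 2 ∨ b = 3 := hm (f2, b) (by simp)
      rw [pushB_same]
      by_cases h1 : (a + b) % 4 = 0
      · rw [if_pos h1]
        have hab : a' = b := by omega
        match w with
        | [] => rw [pushB_nil, hab]
        | (f3, c) :: w' =>
          have hne : f2 ≠ f3 := by
            rw [List.isChain_cons] at hc
            exact hc.1 (f3, c) (by simp)
          rw [pushB_diff (Ne.symm hne), hab]
      · rw [if_neg h1, pushB_same]
        have h2 : (a' + (a + b) % 4) % 4 = b := by omega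
        rw [h2, if_neg (by omega)]
    · rw [pushB_diff hf, pushB_same, if_pos (by omega)]

theorem push_merge {f : String} {a a' : Int} {v : List (String × Int)}
    (hv : RedOK v) (ha' : a' = 1 ∨ a' = 2 ∨ a' = 3)
    (hz : PySem.Int.mod (a' + a) 4 ≠ 0) :
    pushB (f, a') (pushB (f, a) v) = pushB (f, PySem.Int.mod (a' + a) 4) v := by
  obtain ⟨hc, hm⟩ := hv
  rw [mod4_emod] at hz ⊢
  match v with
  | [] =>
    rw [pushB_nil, pushB_same, if_neg (by omega), pushB_nil]
  | (f2, b) :: w =>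
    by_cases hf : f2 = f
    · subst hf
      have hb : b = 1 ∨ b = 2 ∨ b = 3 := hm (f2, b) (by simp)
      rw [pushB_same, pushB_same]
      by_cases h1 : (a + b) % 4 = 0
      · rw [if_pos h1]
        have h2 : ((a' + a) % 4 + b) % 4 = a' := by omega
        rw [h2, if_neg (by omega)]
        match w with
        | [] => rw [pushB_nil]
        | (f3, c) :: w' =>
          have hne : f2 ≠ f3 := by
            rw [List.isChain_cons] at hc
            exact hc.1 (f3, c) (by simp)
          rw [pushB_diff (Ne.symm hne)]
      · rw [if_neg h1, pushB_same]
        have h2 : (a' + (a + b) % 4) % 4 = ((a' + a) % 4 + b) % 4 := by omega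
        rw [h2]
    · rw [pushB_diff hf, pushB_same, if_neg (by omega), pushB_diff hf]

theorem redN {ps : List (String × Int)} (hps : AmtOK ps) :
    RedOK (ps.foldr pushB []) := by
  induction ps with
  | nil => exact ⟨List.IsChain.nil, by simp⟩
  | cons p ps' ih =>
    rw [List.foldr_cons]
    exact pushB_red (ih (fun q hq => hps q (List.mem_cons_of_mem p hq))) (hps p (by simp))

theorem main_fold {ps : List (String × Int)} (hps : AmtOK ps) :
    ∀ s : List (String × Int), RedOK s →
    ps.foldl stepA s = s.foldr pushB (ps.foldr pushB []) := by
  induction ps with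
  | nil =>
    intro s hs
    simp only [List.foldl_nil, List.foldr_nil]
    exact (foldr_pushB_fix hs.1).symm
  | cons p ps' ih =>
    intro s hs
    have hp : p.2 = 1 ∨ p.2 = 2 ∨ p.2 = 3 := hps p (by simp)
    have hps' : AmtOK ps' := fun q hq => hps q (List.mem_cons_of_mem p hq)
    have hN' : RedOK (ps'.foldr pushB []) := redN hps'
    rw [List.foldl_cons, ih hps' _ (stepA_red hs hp), List.foldr_cons]
    obtain ⟨pf, pa⟩ := p
    rcases s.eq_nil_or_concat' with rfl | ⟨t, q, rfl⟩
    · simp only [stepA, List.getLast?_nil, List.nil_append, mod4_small hp, List.foldr_nil]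
      rfl
    · obtain ⟨qf, qa⟩ := q
      have hq2 : qa = 1 ∨ qa = 2 ∨ qa = 3 := by
        have := hs.2 (qf, qa) (by simp); simpa using this
      simp only [stepA, List.getLast?_concat, List.dropLast_concat]
      split_ifs with hf hz
      · simp only at hf
        subst hf
        rw [List.foldr_append, List.foldr_cons, List.foldr_nil,
            push_cancel hN' hq2 hz]
      · simp only at hf
        subst hf
        rw [List.foldr_append, List.foldr_cons, List.foldr_nil,
            List.foldr_append, List.foldr_cons, List.foldr_nil,
            push_merge hN' hq2 hz]
      · rw [mod4_small hp, List.foldr_append, List.foldr_cons, List.foldr_nil,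
            List.foldr_append, List.foldr_cons, List.foldr_nil]

-- a failing full scan certifies no adjacent same-face pair
theorem scanMerge_none_chain : ∀ {l : List (String × Int)}, scanMerge l = none →
    l.IsChain (fun p q => p.1 ≠ q.1) := by
  intro l
  induction l with
  | nil => intro _; exact List.IsChain.nil
  | cons p t ih =>
    intro h
    match t with
    | [] => exact List.IsChain.singleton p
    | q :: rest =>
      simp only [scanMerge] at h
      split_ifs at h with hf
      · cases hm : scanMerge (q :: rest) with
        | none =>
          rw [List.isChain_cons]
          exact ⟨fun b hb => by simp at hb; subst hb; exact hf, ih hm⟩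
        | some m => rw [hm] at h; simp at h

-- one successful merge preserves the pushB-normal form and the amount range
theorem scanMerge_some : ∀ {l l' : List (String × Int)}, AmtOK l → scanMerge l = some l' →
    l'.foldr pushB [] = l.foldr pushB [] ∧ AmtOK l' := by
  intro l
  induction l with
  | nil => intro l' _ h; simp [scanMerge] at h
  | cons p t ih =>
    intro l' hA h
    match t with
    | [] => simp [scanMerge] at h
    | q :: rest =>
      have hp : p.2 = 1 ∨ p.2 = 2 ∨ p.2 = 3 := hA p (by simp)
      have hq : q.2 = 1 ∨ q.2 = 2 ∨ q.2 = 3 := hA q (by simp)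
      have hrest : AmtOK rest := fun x hx => hA x (by simp [hx])
      have hvred : RedOK (rest.foldr pushB []) := redN hrest
      obtain ⟨pf, pa⟩ := p
      obtain ⟨qf, qa⟩ := q
      simp only at hp hq
      simp only [scanMerge] at h
      split_ifs at h with hf hz
      · simp only at hf
        subst hf
        simp only at hz
        rw [Option.some_inj] at h
        subst h
        constructor
        · rw [List.foldr_cons, List.foldr_cons, push_cancel hvred hp hz]
        · exact hrest
      · simp only at hf
        subst hf
        simp only at hz
        rw [Option.some_inj] at h
        subst h
        constructor
        · rw [List.foldr_cons, List.foldr_cons, List.foldr_cons,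
              push_merge hvred hp hz]
        · intro x hx
          rcases List.mem_cons.mp hx with rfl | hx
          · rw [mod4_emod] at hz ⊢
            simp only
            rcases hp with h1|h1 <;> rcases hq with h2|h2 <;> omega
          · exact hrest x hx
      · cases hm : scanMerge ((qf, qa) :: rest) with
        | none => rw [hm] at h; simp at h
        | some m =>
          rw [hm] at h
          simp only [Option.map_some, Option.some_inj] at h
          subst h
          have htA : AmtOK ((qf, qa) :: rest) := fun x hx => hA x (by simp [List.mem_cons.mp hx])
          obtain ⟨heq, hm'⟩ := ih htA hm
          constructor
          · rw [List.foldr_cons, List.foldr_cons, heq]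
          · intro x hx
            rcases List.mem_cons.mp hx with rfl | hx
            · exact hp
            · exact hm' x hx

theorem reduceFix_none {l : List (String × Int)} (h : scanMerge l = none) :
    reduceFix l = l := by
  rw [reduceFix]
  split <;> simp_all

theorem reduceFix_some {l l' : List (String × Int)} (h : scanMerge l = some l') :
    reduceFix l = reduceFix l' := by
  rw [reduceFix]
  split <;> simp_all

theorem reduceFix_eq : ∀ (n : Nat) (l : List (String × Int)), l.length ≤ n → AmtOK l →
    reduceFix l = l.foldr pushB [] := by
  intro n
  induction n with
  | zero =>
    intro l hn hA
    have : l = [] := List.length_eq_zero_iff.mp (Nat.le_zero.mp hn)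
    subst this
    rw [reduceFix_none rfl]
    rfl
  | succ n ih =>
    intro l hn hA
    cases h : scanMerge l with
    | none =>
      rw [reduceFix_none h]
      exact (foldr_pushB_fix (scanMerge_none_chain h)).symm
    | some l' =>
      obtain ⟨heq, hA'⟩ := scanMerge_some hA h
      have hlen := scanMerge_length h
      rw [reduceFix_some h, ih l' (by omega) hA', heq]

theorem suffix_singleton_concat {α : Type} {l t : List α} {x d : α} (h : l = t ++ [d]) : ([x] <:+ l) ↔ x = d := by
  subst h
  constructor
  · rintro ⟨u, hu⟩
    exact (List.concat_inj.mp (by simpa [List.concat] using hu)).2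
  · rintro rfl; exact ⟨t, rfl⟩

theorem endswith_last {m : String} {t : List Char} {d c : Char} (h : m.toList = t ++ [d]) :
    PySem.Str.endswith m (String.ofList [c]) = true ↔ c = d := by
  have h1 := PySem.Chars.endswith_iff m.toList [c]
  have h2 : PySem.Str.endswith m (String.ofList [c]) = PySem.Chars.endswith m.toList [c] := by
    simp [PySem.Str.endswith_eq]
  rw [h2, h1, suffix_singleton_concat h]

theorem getlast_pyGet {m : String} {t : List Char} {d : Char} (h : m.toList = t ++ [d]) :
    PySem.Str.pyGet? m (-1) = some d := by
  simp only [PySem.Str.pyGet?_eq, PySem.Chars.pyGet?_eq_listPyGet?]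
  rw [PySem.List.pyGet?_neg_ofNat m.toList 1 (by omega) (by simp [h])]
  simp [h]

theorem endswith_false {m : String} {t : List Char} {d c : Char} (h : m.toList = t ++ [d])
    (hd : d ≠ c) : PySem.Str.endswith m (String.ofList [c]) = false := by
  cases hb : PySem.Str.endswith m (String.ofList [c]) with
  | false => rfl
  | true => exact absurd ((endswith_last h).mp hb) (fun he => hd he.symm)

theorem parse_eq (m : String) (h : m ≠ "") : parse_move_amount m = parseB m := by
  have hl : m.toList ≠ [] := by simpa using h
  obtain ⟨t, d, hcat⟩ := List.eq_nil_or_concat' m.toList |>.resolve_left hl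
  have g := getlast_pyGet hcat
  unfold parse_move_amount parseB
  rw [g]
  by_cases hd2 : d = '2'
  · subst hd2
    rw [show PySem.Str.endswith m "2" = true from (endswith_last hcat).mpr rfl]
    simp
  · by_cases hd3 : d = '\''
    · subst hd3
      rw [show PySem.Str.endswith m "2" = false from endswith_false hcat (by decide)]
      rw [show PySem.Str.endswith m "'" = true from (endswith_last hcat).mpr rfl]
      simp
    · rw [show PySem.Str.endswith m "2" = false from endswith_false hcat hd2]
      rw [show PySem.Str.endswith m "'" = false from endswith_false hcat hd3]
      simp [hd2, hd3]

theorem parseB_amt (m : String) :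
    (parseB m).2 = 1 ∨ (parseB m).2 = 2 ∨ (parseB m).2 = 3 := by
  unfold parseB
  split_ifs <;> simp

theorem fmt_fold {l : List (String × Int)} (hl : ∀ p ∈ l, p.2 = 1 ∨ p.2 = 2 ∨ p.2 = 3) :
    ∀ acc : List String, l.foldl fmtA acc =
      acc ++ l.map (fun p => if p.2 = 1 then p.1 else if p.2 = 2 then p.1 ++ "2" else p.1 ++ "'") := by
  induction l with
  | nil => intro acc; simp
  | cons p l' ih =>
    intro acc
    have hp := hl p (by simp)
    have hstep : fmtA acc p = acc ++ [if p.2 = 1 then p.1 else if p.2 = 2 then p.1 ++ "2" else p.1 ++ "'"] := by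
      unfold fmtA
      rcases hp with h|h|h <;> simp [h]
    rw [List.foldl_cons, hstep, ih (fun q hq => hl q (List.mem_cons_of_mem p hq))]
    simp

-- ===== VERDICT (by name: the statement is the Claim_ definition above) =====
theorem canonicalize_moves_spec : Claim_equal_canonicalize_moves := by
  intro moves _ hpre
  unfold Spec_canonicalize_moves canonicalize_moves canonicalize_moves_alt
  have hamts : AmtOK (moves.map parseB) := by
    intro p hp
    obtain ⟨m, _, rfl⟩ := List.mem_map.mp hp
    exact parseB_amt m
  have hAB : moves.foldl (fun red m => stepA red (parse_move_amount m)) [] =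
      (moves.map parseB).foldl stepA [] := by
    rw [← List.foldl_map]
    congr 1
    exact List.map_congr_left (fun m hm => parse_eq m (hpre m hm))
  rw [hAB, main_fold hamts [] ⟨List.IsChain.nil, by simp⟩, List.foldr_nil,
      reduceFix_eq (moves.map parseB).length _ le_rfl hamts]
  exact fmt_fold (redN hamts).2 []
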